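-- pv_equiv track=rewrite | github.com/scotsun/bff | code/src/train_clf_aom.py | get_modality_config
-- ===== SOURCE A (Python) =====
-- def get_modality_config(flag_list: list[str]) -> dict[str, bool]:
--     modality_config = {
--         "birth_newborn": False,
--         "developmental": False,
--         "birth_mom": False,
--         "prenatal": False,
--     }
--     # check for all
--     if any([f == "all" for f in flag_list]):
--         for k in modality_config.keys():
--             modality_config[k] = True
--         return modality_config
--     # check flag one-by-one
--     for flag in flag_list:
--         match flag:
--             case "birth":
--                 modality_config["birth_mom"] = True
--                 modality_config["birth_newborn"] = True
--             case "developmental":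
--                 modality_config["developmental"] = True
--             case "prenatal":
--                 modality_config["prenatal"] = True
--             case _:
--                 raise ValueError("Incorrect value for modality flag.")
--     return modality_config
-- ===== SOURCE B (Python) =====
-- def get_modality_config(flag_list: list[str]) -> dict[str, bool]:
--     keys = ("birth_newborn", "developmental", "birth_mom", "prenatal")
--     if "all" in flag_list:
--         return {k: True for k in keys}
--     if any(f not in ("birth", "developmental", "prenatal") for f in flag_list):
--         raise ValueError("Incorrect value for modality flag.")
--     return {
--         "birth_newborn": "birth" in flag_list,
--         "developmental": "developmental" in flag_list,
--         "birth_mom": "birth" in flag_list,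
--         "prenatal": "prenatal" in flag_list,
--     }
-- ===== Notes on version B (the rewrite author's own statement) =====
-- stated objective: simpler
-- what changed: B replaces the stateful match-loop that mutates a dict with a single validation pass followed by building each output value directly from a membership test on the flag list.
import Mathlib
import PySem

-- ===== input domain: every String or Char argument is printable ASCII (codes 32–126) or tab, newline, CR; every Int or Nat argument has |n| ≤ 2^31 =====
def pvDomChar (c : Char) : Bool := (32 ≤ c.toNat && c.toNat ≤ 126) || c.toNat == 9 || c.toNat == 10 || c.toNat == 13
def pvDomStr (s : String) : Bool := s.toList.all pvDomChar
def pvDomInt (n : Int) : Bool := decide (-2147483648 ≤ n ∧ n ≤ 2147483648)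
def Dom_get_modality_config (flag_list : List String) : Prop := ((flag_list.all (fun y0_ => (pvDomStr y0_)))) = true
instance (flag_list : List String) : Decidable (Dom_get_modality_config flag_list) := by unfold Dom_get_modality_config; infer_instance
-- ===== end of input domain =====

-- B replaces A's stateful match-loop mutating a dict with one validation pass plus
-- four direct membership tests; same cost, simpler decomposition.


-- ===== PORT A =====
-- A's match-loop: mutates the dict flag by flag; none = the ValueError branch.
def pvLoopA : List String → PySem.Dict String Bool → Option (PySem.Dict String Bool)
  | [], d => some d
  | f :: rest, d =>
    if f == "birth" then
      pvLoopA rest ((d.insert "birth_mom" true).insert "birth_newborn" true)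
    else if f == "developmental" then
      pvLoopA rest (d.insert "developmental" true)
    else if f == "prenatal" then
      pvLoopA rest (d.insert "prenatal" true)
    else none  -- raise ValueError("Incorrect value for modality flag.")

def get_modality_config (flag_list : List String) : List (String × Bool) :=
  let init : PySem.Dict String Bool :=
    ((((PySem.Dict.empty.insert "birth_newborn" false).insert "developmental" false).insert
        "birth_mom" false).insert "prenatal" false)
  if flag_list.any (fun f => f == "all") then
    -- for k in modality_config.keys(): modality_config[k] = True
    (init.keys.foldl (fun d k => d.insert k true) init).items
  else
    match pvLoopA flag_list init with
    | some d => d.items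
    | none => []  -- unreachable under Pre_ (Python raises ValueError here)

-- ===== PORT B =====
def get_modality_config_alt (flag_list : List String) : List (String × Bool) :=
  if flag_list.contains "all" then
    [("birth_newborn", true), ("developmental", true), ("birth_mom", true), ("prenatal", true)]
  else if flag_list.any (fun f => !(f == "birth" || f == "developmental" || f == "prenatal")) then
    []  -- raise ValueError("Incorrect value for modality flag.")
  else
    [("birth_newborn", flag_list.contains "birth"),
     ("developmental", flag_list.contains "developmental"),
     ("birth_mom", flag_list.contains "birth"),
     ("prenatal", flag_list.contains "prenatal")]

-- ===== PRECONDITION & SPEC =====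
-- Pre_ excludes exactly the inputs where A raises ValueError: a flag other than the
-- three known ones while "all" is absent.
def Pre_get_modality_config (flag_list : List String) : Prop :=
  "all" ∈ flag_list ∨
    ∀ f ∈ flag_list, f = "birth" ∨ f = "developmental" ∨ f = "prenatal"
instance (flag_list : List String) : Decidable (Pre_get_modality_config flag_list) := by
  unfold Pre_get_modality_config; infer_instance

def pvWitness_get_modality_config : List String := ["birth", "prenatal"]

def Spec_get_modality_config (flag_list : List String) (out : List (String × Bool)) : Prop := out = get_modality_config_alt flag_list
instance (flag_list : List String) (out : List (String × Bool)) : Decidable (Spec_get_modality_config flag_list out) := by unfold Spec_get_modality_config; infer_instance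

-- ===== CLAIM (what is proved, stated in full; the proofs are below) =====
def Claim_equal_get_modality_config : Prop := ∀ (flag_list : List String), Dom_get_modality_config flag_list → Pre_get_modality_config flag_list → Spec_get_modality_config flag_list (get_modality_config flag_list)

-- ===== LEMMAS AND PROOFS =====

-- Loop characterisation: on valid flags the loop just ORs membership into the four slots.
theorem pvLoopA_char (fl : List String)
    (hv : ∀ f ∈ fl, f = "birth" ∨ f = "developmental" ∨ f = "prenatal") :
    ∀ (x y z w : Bool),
      pvLoopA fl (PySem.Dict.mk
        [("birth_newborn", x), ("developmental", y), ("birth_mom", z), ("prenatal", w)]) =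
      some (PySem.Dict.mk
        [("birth_newborn", x || fl.contains "birth"),
         ("developmental", y || fl.contains "developmental"),
         ("birth_mom", z || fl.contains "birth"),
         ("prenatal", w || fl.contains "prenatal")]) := by
  induction fl with
  | nil => intro x y z w; simp [pvLoopA]
  | cons f rest ih =>
    intro x y z w
    have hrest : ∀ g ∈ rest, g = "birth" ∨ g = "developmental" ∨ g = "prenatal" :=
      fun g hg => hv g (List.mem_cons_of_mem f hg)
    rcases hv f (List.mem_cons_self) with hf | hf | hf <;> subst hf <;>
      simp [pvLoopA, PySem.Dict.insert, ih hrest]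

-- ===== VERDICT (by name: the statement is the Claim_ definition above) =====
theorem get_modality_config_spec : Claim_equal_get_modality_config := by
  intro fl _ hpre
  unfold Spec_get_modality_config get_modality_config get_modality_config_alt
  by_cases hall : "all" ∈ fl
  · have h1 : fl.any (fun f => f == "all") = true := by
      simp only [List.any_eq_true]; exact ⟨"all", hall, by simp⟩
    have h2 : fl.contains "all" = true := by simp [hall]
    simp only [h1, h2, if_true]
    rfl
  · rcases hpre with h | hv
    · exact absurd h hall
    have h1 : fl.any (fun f => f == "all") = false := by
      simp [List.any_eq_false]
      intro f hf
      rcases hv f hf with h | h | h <;> simp [h]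
    have h2 : fl.contains "all" = false := by simp [hall]
    have h3 : fl.any (fun f => !(f == "birth" || f == "developmental" || f == "prenatal")) = false := by
      simp [List.any_eq_false]
      intro f hf
      rcases hv f hf with h | h | h <;> simp [h]
    simp only [h1, h2, h3, if_false, Bool.false_eq_true]
    have := pvLoopA_char fl hv false false false false
    have hinit : ((((PySem.Dict.empty.insert "birth_newborn" false).insert "developmental" false).insert
        "birth_mom" false).insert "prenatal" false) = PySem.Dict.mk
        [("birth_newborn", false), ("developmental", false), ("birth_mom", false), ("prenatal", false)] := by decide
    simp only [hinit, this]
    rfl
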